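-- pv_equiv track=rewrite | github.com/YadavAashutosh/GestureVox-AR-Voxel-Builder | shape_library/shapes.py | shape_arch
-- ===== SOURCE A (Python) =====
-- from typing import List, Tuple
--
-- Coord = Tuple[int, int, int]
--
-- def shape_arch(span=6, height=4) -> List[Coord]:
--     pts = []
--     hw = span // 2
--     for x in range(-hw, hw+1):
--         for y in range(height + 1):
--             if abs(x) == hw or (y == height and abs(x) <= hw):
--                 pts.append((x, y, 0))
--             # curved top
--             r = hw
--             if x*x + (y - height)*(y - height) <= r*r and y >= height - hw:
--                 pts.append((x, y, 0))
--     return list(set(pts))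
-- ===== SOURCE B (Python) =====
-- def _isqrt(n):
--     # integer square root by Newton's method
--     x = n
--     y = (x + 1) // 2
--     while y < x:
--         x = y
--         y = (x + n // x) // 2
--     return x
--
--
-- def shape_arch(span=6, height=4):
--     # collect the voxel set column by column: each column x contributes one
--     # contiguous run [lo, height] — the full pillar on the two walls, the run
--     # under the circular cap inside
--     hw = span // 2
--     pts = set()
--     for x in range(-hw, hw + 1):
--         lo = 0 if abs(x) == hw else max(0, height - _isqrt(hw * hw - x * x))
--         pts.update((x, y, 0) for y in range(lo, height + 1))
--     return list(pts)
-- ===== Notes on version B (the rewrite author's own statement) =====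
-- stated objective: alternative
-- what changed: Instead of testing wall/roof/disk conditions at every cell of the bounding box and appending (with duplicates) to a list that is deduplicated at the end, B computes for each column x the single contiguous run [lo, height] of kept cells (lo = 0 on the walls, lo = max(0, height - isqrt(hw^2 - x^2)) inside, with a Newton-iteration integer sqrt) and accumulates the runs directly into the voxel set.
import Mathlib
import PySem

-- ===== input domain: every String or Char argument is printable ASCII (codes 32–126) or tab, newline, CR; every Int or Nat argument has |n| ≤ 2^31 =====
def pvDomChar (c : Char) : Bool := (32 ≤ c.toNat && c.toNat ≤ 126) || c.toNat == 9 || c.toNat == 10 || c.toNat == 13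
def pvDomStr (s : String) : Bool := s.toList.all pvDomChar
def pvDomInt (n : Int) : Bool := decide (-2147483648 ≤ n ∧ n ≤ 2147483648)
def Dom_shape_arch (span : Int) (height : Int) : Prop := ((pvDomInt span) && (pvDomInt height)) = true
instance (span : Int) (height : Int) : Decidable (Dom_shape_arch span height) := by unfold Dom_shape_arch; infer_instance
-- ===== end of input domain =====

-- B replaces A's per-cell condition tests over the whole bounding box by accumulating, for each
-- column x, the single contiguous run [lo, height] of kept cells (lo from an integer square
-- root) directly into the voxel set, so no per-cell scan and no duplicate appends are needed.

-- ===== PORT A =====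
def shape_arch (span : Int) (height : Int) : List (Int × Int × Int) :=
  let hw := PySem.Int.floordiv span 2
  let pts : List (Int × Int × Int) :=
    (PySem.List.pyRange (-hw) (hw+1) 1).foldl (fun pts x =>
      (PySem.List.pyRange 0 (height+1) 1).foldl (fun pts y =>
        let pts := if |x| = hw ∨ (y = height ∧ |x| ≤ hw) then pts ++ [(x, y, 0)] else pts
        let r := hw
        if x*x + (y - height)*(y - height) ≤ r*r ∧ height - hw ≤ y then pts ++ [(x, y, 0)] else pts)
        pts) []
  PySem.Set.ofList pts

-- ===== PORT B =====
-- helper: Source B's _isqrt Newton loop 'while y < x: x = y; y = (x + n // x) // 2'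
-- (the 0 ≤ y conjunct in the guard only makes the recursion total; Python B maintains 0 ≤ y wherever it runs, since it is only called with n ≥ 0)
def bIsqrtGo (n x y : Int) : Int :=
  if 0 ≤ y ∧ y < x then
    bIsqrtGo n y (PySem.Int.floordiv (y + PySem.Int.floordiv n y) 2)
  else x
termination_by x.toNat
decreasing_by omega

def bIsqrt (n : Int) : Int :=
  bIsqrtGo n n (PySem.Int.floordiv (n + 1) 2)

def shape_arch_alt (span : Int) (height : Int) : List (Int × Int × Int) :=
  let hw := PySem.Int.floordiv span 2
  (PySem.List.pyRange (-hw) (hw+1) 1).foldl (fun pts x =>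
    let lo : Int := if |x| = hw then 0 else max 0 (height - bIsqrt (hw*hw - x*x))
    PySem.Set.update pts ((PySem.List.pyRange lo (height+1) 1).map (fun y => (x, y, 0))))
    PySem.Set.empty

-- ===== PRECONDITION & SPEC =====
def Spec_shape_arch (span : Int) (height : Int) (out : List (Int × Int × Int)) : Prop := out = shape_arch_alt span height
instance (span : Int) (height : Int) (out : List (Int × Int × Int)) : Decidable (Spec_shape_arch span height out) := by unfold Spec_shape_arch; infer_instance

-- ===== CLAIM (what is proved, stated in full; the proofs are below) =====
def Claim_equal_shape_arch : Prop := ∀ (span : Int) (height : Int), Dom_shape_arch span height → Spec_shape_arch span height (shape_arch span height)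

-- ===== LEMMAS AND PROOFS =====

-- A's per-cell appended block, and the kept-cell condition
def aBlock (hw height x y : Int) : List (Int × Int × Int) :=
  (if |x| = hw ∨ (y = height ∧ |x| ≤ hw) then [(x, y, 0)] else []) ++
  (if x*x + (y - height)*(y - height) ≤ hw*hw ∧ height - hw ≤ y then [(x, y, 0)] else [])

lemma aBlock_sub (hw height x y : Int) : ∀ v ∈ aBlock hw height x y, v = (x, y, 0) := by
  intro v hv
  unfold aBlock at hv
  split_ifs at hv <;> simp_all

-- one Newton step from x ≥ 1 stays an upper bracket: n < (y+1)^2 for y = (x + n//x)//2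
lemma newton_upper (n x : Int) (hn : 0 ≤ n) (hx : 1 ≤ x) :
    n < (PySem.Int.floordiv (x + PySem.Int.floordiv n x) 2 + 1) * (PySem.Int.floordiv (x + PySem.Int.floordiv n x) 2 + 1) := by
  have hq := PySem.Int.floordiv_mul_add_mod n x
  have hm0 := PySem.Int.mod_nonneg n (b := x) (by omega)
  have hm1 := PySem.Int.mod_lt n (b := x) (by omega)
  set q := PySem.Int.floordiv n x with hqdef
  have hy := PySem.Int.floordiv_mul_add_mod (x + q) 2
  have he0 := PySem.Int.mod_nonneg (x + q) (b := 2) (by omega)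
  have he1 := PySem.Int.mod_lt (x + q) (b := 2) (by omega)
  set y := PySem.Int.floordiv (x + q) 2 with hydef
  have hq0 : 0 ≤ q := by nlinarith
  have h1 : 4*(q*x + x) ≤ (x+q+1)*(x+q+1) := by nlinarith [sq_nonneg (x - q - 1)]
  have h2 : x + q + 1 ≤ 2*(y+1) := by omega
  have h3 : (x+q+1)*(x+q+1) ≤ (2*(y+1))*(2*(y+1)) := by nlinarith
  nlinarith

-- bIsqrtGo spec, by induction on an upper bound for x
lemma bIsqrtGo_spec (k : Nat) : ∀ (n x y : Int), x.toNat ≤ k → 1 ≤ n → 1 ≤ x →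
    y = PySem.Int.floordiv (x + PySem.Int.floordiv n x) 2 → n < (x+1) * (x+1) →
    0 ≤ bIsqrtGo n x y ∧ bIsqrtGo n x y * bIsqrtGo n x y ≤ n ∧ n < (bIsqrtGo n x y + 1) * (bIsqrtGo n x y + 1) := by
  induction k with
  | zero =>
    intro n x y _ _ hx _ _
    omega
  | succ k ih =>
    intro n x y hk hn hx hy hub
    have hq := PySem.Int.floordiv_mul_add_mod n x
    have hm0 := PySem.Int.mod_nonneg n (b := x) (by omega)
    have hm1 := PySem.Int.mod_lt n (b := x) (by omega)
    have hq0 : 0 ≤ PySem.Int.floordiv n x := by nlinarith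
    have hy2 := PySem.Int.floordiv_mul_add_mod (x + PySem.Int.floordiv n x) 2
    have he0 := PySem.Int.mod_nonneg (x + PySem.Int.floordiv n x) (b := 2) (by omega)
    have he1 := PySem.Int.mod_lt (x + PySem.Int.floordiv n x) (b := 2) (by omega)
    have hy0 : 0 ≤ y := by omega
    have hyub : n < (y + 1) * (y + 1) := hy ▸ newton_upper n x (by omega) hx
    rw [bIsqrtGo]
    split_ifs with hcond
    · have hy1 : 1 ≤ y := by nlinarith
      exact ih n y _ (by omega) hn hy1 rfl hyub
    · have hxy : x ≤ y := by omega
      refine ⟨by omega, ?_, hub⟩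
      have hxq : x ≤ PySem.Int.floordiv n x := by omega
      nlinarith

-- bIsqrt spec: for n ≥ 0 the result r satisfies 0 ≤ r, r*r ≤ n < (r+1)*(r+1)
lemma bIsqrt_spec (n : Int) (hn : 0 ≤ n) :
    0 ≤ bIsqrt n ∧ bIsqrt n * bIsqrt n ≤ n ∧ n < (bIsqrt n + 1) * (bIsqrt n + 1) := by
  rcases eq_or_lt_of_le hn with h0 | h1
  · rw [← h0]
    have hf : PySem.Int.floordiv ((0:Int) + 1) 2 = 0 := by decide
    have hb0 : bIsqrt 0 = 0 := by
      rw [bIsqrt, bIsqrtGo, hf]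
      norm_num
    rw [hb0]
    norm_num
  · have hnn : PySem.Int.floordiv n n = 1 := by
      rw [PySem.Int.floordiv_eq_iff_of_pos h1]
      omega
    exact bIsqrtGo_spec n.toNat n n _ (le_refl _) h1 h1 (by rw [hnn]) (by nlinarith)

-- Set.add of a present element is the identity
lemma set_add_mem {α : Type} [BEq α] [LawfulBEq α] (s : PySem.Set α) (v : α) (h : v ∈ s) :
    PySem.Set.add s v = s := by
  simp [PySem.Set.add, PySem.Set.contains, h]

lemma set_add_not_mem {α : Type} [BEq α] [LawfulBEq α] (s : PySem.Set α) (v : α) (h : v ∉ s) :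
    PySem.Set.add s v = s ++ [v] := by
  simp [PySem.Set.add, PySem.Set.contains, h]

-- folding add over a list whose elements are all e collapses to at most one add
lemma foldl_add_const {α : Type} [BEq α] [LawfulBEq α] (l : List α) (e : α) (hl : ∀ v ∈ l, v = e) (s : PySem.Set α) :
    l.foldl PySem.Set.add s = if l = [] then s else PySem.Set.add s e := by
  induction l generalizing s with
  | nil => simp
  | cons a t ih =>
    have ha : a = e := hl a (by simp)
    subst ha
    have ht : ∀ v ∈ t, v = a := fun v hv => hl v (by simp [hv])
    simp only [List.foldl_cons, ih ht, reduceCtorEq, if_false]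
    split_ifs with h
    · rfl
    · rw [set_add_mem _ a (by simp [PySem.Set.mem_add])]

-- dedup of a flatMap of constant blocks over cells with pairwise-distinct labels
lemma foldl_add_flatMap {α ι : Type} [BEq α] [LawfulBEq α] [DecidableEq α] (cells : List ι) (blk : ι → List α) (e : ι → α)
    (hblk : ∀ i, ∀ v ∈ blk i, v = e i) :
    ∀ s : PySem.Set α, (cells.map e).Nodup → (∀ i ∈ cells, e i ∉ s) →
    (cells.flatMap blk).foldl PySem.Set.add s = s ++ cells.flatMap (fun i => if blk i = [] then [] else [e i]) := by
  induction cells with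
  | nil => simp
  | cons c t ih =>
    intro s hnd hs
    have hfold := foldl_add_const (blk c) (e c) (hblk c) s
    rw [List.flatMap_cons, List.foldl_append, hfold]
    rcases eq_or_ne (blk c) [] with hb | hb
    · rw [if_pos hb, ih s (by simpa using hnd.of_cons) (fun i hi => hs i (by simp [hi])),
        List.flatMap_cons, hb]
      rw [if_pos rfl, List.nil_append]
    · rw [if_neg hb, set_add_not_mem s (e c) (hs c (by simp))]
      have hnotc : ∀ i ∈ t, e i ∉ s ++ [e c] := by
        intro i hi
        simp only [List.mem_append, List.mem_singleton]
        rintro (h | h)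
        · exact hs i (by simp [hi]) h
        · rw [List.map_cons, List.nodup_cons] at hnd
          exact hnd.1 (List.mem_map.mpr ⟨i, hi, h⟩)
      rw [ih (s ++ [e c]) (by simpa using hnd.of_cons) hnotc,
        List.flatMap_cons, if_neg hb, List.append_assoc]

-- flatMap of an if-singleton is map over filter
lemma flatMap_ite_singleton {α β : Type} (l : List α) (p : α → Prop) [DecidablePred p] (f : α → β) :
    l.flatMap (fun y => if p y then [f y] else []) = (l.filter (fun y => decide (p y))).map f := by
  induction l with
  | nil => rfl
  | cons a t ih => by_cases h : p a <;> simp [h, ih]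

-- filtering an increasing integer range by a lower bound keeps a suffix range
lemma filter_le_pyRange (t a b : Int) :
    (PySem.List.pyRange a b 1).filter (fun y => decide (t ≤ y)) = PySem.List.pyRange (max a t) b 1 := by
  by_cases hab : b ≤ a
  · rw [PySem.List.pyRange_one_eq_nil hab, PySem.List.pyRange_one_eq_nil (le_trans hab (le_max_left a t))]
    rfl
  · rw [not_le] at hab
    rw [PySem.List.pyRange_one_cons hab]
    by_cases hta : t ≤ a
    · rw [List.filter_cons_of_pos (by simpa), filter_le_pyRange t (a+1) b,
        max_eq_left hta, max_eq_left (by omega), ← PySem.List.pyRange_one_cons hab]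
    · rw [List.filter_cons_of_neg (by simp only [decide_eq_true_eq]; omega), filter_le_pyRange t (a+1) b]
      congr 1
      omega
termination_by (b - a).toNat
decreasing_by all_goals omega

-- the kept-cell condition, for y in [0, height] and |x| ≤ hw, is exactly lo(x) ≤ y
lemma cond_iff_lo (hw height x y : Int) (hx : -hw ≤ x ∧ x < hw + 1) (hy : 0 ≤ y ∧ y < height + 1) :
    ((|x| = hw ∨ (y = height ∧ |x| ≤ hw)) ∨ (x*x + (y - height)*(y - height) ≤ hw*hw ∧ height - hw ≤ y))
    ↔ (if |x| = hw then (0:Int) else max 0 (height - bIsqrt (hw*hw - x*x))) ≤ y := by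
  have hhw : 0 ≤ hw := by omega
  have habs : |x| ≤ hw := abs_le.mpr (by omega)
  by_cases hxe : |x| = hw
  · rw [if_pos hxe]
    constructor
    · intro _; omega
    · intro _; exact Or.inl (Or.inl hxe)
  · rw [if_neg hxe]
    set d : Int := bIsqrt (hw*hw - x*x) with hd
    have hxlt : |x| < hw := lt_of_le_of_ne habs hxe
    have hxx : x*x < hw*hw := by
      nlinarith [mul_self_lt_mul_self (abs_nonneg x) hxlt, abs_mul_abs_self x]
    have hspec := bIsqrt_spec (hw*hw - x*x) (by nlinarith)
    rw [← hd] at hspec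
    obtain ⟨hdpos, hspec⟩ := hspec
    have hdle : d ≤ hw := by nlinarith
    constructor
    · rintro ((h | ⟨h, _⟩) | ⟨h1, _⟩)
      · exact absurd h hxe
      · omega
      · -- (height - y)^2 ≤ hw^2 - x^2 < (d+1)^2 gives height - y ≤ d
        have : height - y ≤ d := by nlinarith
        omega
    · intro h
      right
      constructor
      · have h1 : height - y ≤ d := by omega
        have h2 : 0 ≤ height - y := by omega
        nlinarith
      · omega

-- per-column equality: A's filtered column equals B's emitted run
lemma column_eq (hw height x : Int) (hx : -hw ≤ x ∧ x < hw + 1) :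
    (PySem.List.pyRange 0 (height+1) 1).flatMap
      (fun y => if aBlock hw height x y = [] then [] else [((x : Int), (y : Int), (0 : Int))])
    = (PySem.List.pyRange (if |x| = hw then (0:Int) else max 0 (height - bIsqrt (hw*hw - x*x))) (height+1) 1).map
        (fun y => (x, y, 0)) := by
  have hblk : ∀ y, (aBlock hw height x y = []) ↔
      ¬ ((|x| = hw ∨ (y = height ∧ |x| ≤ hw)) ∨ (x*x + (y - height)*(y - height) ≤ hw*hw ∧ height - hw ≤ y)) := by
    intro y
    unfold aBlock
    split_ifs <;> simp_all
  have h1 : (fun y => if aBlock hw height x y = [] then ([] : List (Int × Int × Int)) else [(x, y, 0)])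
      = fun y => if ((|x| = hw ∨ (y = height ∧ |x| ≤ hw)) ∨ (x*x + (y - height)*(y - height) ≤ hw*hw ∧ height - hw ≤ y)) then [(x, y, 0)] else [] := by
    funext y
    by_cases h : ((|x| = hw ∨ (y = height ∧ |x| ≤ hw)) ∨ (x*x + (y - height)*(y - height) ≤ hw*hw ∧ height - hw ≤ y))
    · rw [if_neg (fun hc => (hblk y).mp hc h), if_pos h]
    · rw [if_pos ((hblk y).mpr h), if_neg h]
  rw [h1, flatMap_ite_singleton]
  have h2 : (PySem.List.pyRange 0 (height+1) 1).filter
        (fun y => decide ((|x| = hw ∨ (y = height ∧ |x| ≤ hw)) ∨ (x*x + (y - height)*(y - height) ≤ hw*hw ∧ height - hw ≤ y)))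
      = (PySem.List.pyRange 0 (height+1) 1).filter
        (fun y => decide ((if |x| = hw then (0:Int) else max 0 (height - bIsqrt (hw*hw - x*x))) ≤ y)) := by
    apply List.filter_congr
    intro y hy
    rw [PySem.List.mem_pyRange_one] at hy
    simp only [decide_eq_decide]
    exact cond_iff_lo hw height x y hx hy
  rw [h2, filter_le_pyRange]
  congr 2
  split_ifs with h <;> omega

-- folding set.update over per-element blocks builds set(flatten) in insertion order
lemma foldl_update_flatMap {α β : Type} [BEq α] [LawfulBEq α] (l : List β) (f : β → List α) :
    ∀ s : List α, l.foldl (fun s b => PySem.Set.update s (f b)) (PySem.Set.ofList s)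
      = PySem.Set.ofList (s ++ l.flatMap f) := by
  induction l with
  | nil => intro s; simp
  | cons c t ih =>
    intro s
    rw [List.foldl_cons, ← PySem.Set.ofList_append, ih, List.flatMap_cons, List.append_assoc]

-- ===== VERDICT (by name: the statement is the Claim_ definition above) =====
theorem shape_arch_spec : Claim_equal_shape_arch := by
  intro span height _
  unfold Spec_shape_arch
  simp only [shape_arch, shape_arch_alt]
  set hw := PySem.Int.floordiv span 2 with hhw
  set xs := PySem.List.pyRange (-hw) (hw+1) 1 with hxs
  set ys := PySem.List.pyRange 0 (height+1) 1 with hys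
  -- A's nested loops build the flatMap of aBlock
  have hA : xs.foldl (fun pts x =>
      ys.foldl (fun pts y =>
        if x*x + (y - height)*(y - height) ≤ hw*hw ∧ height - hw ≤ y then
          (if |x| = hw ∨ (y = height ∧ |x| ≤ hw) then pts ++ [(x, y, 0)] else pts) ++ [(x, y, 0)]
        else
          (if |x| = hw ∨ (y = height ∧ |x| ≤ hw) then pts ++ [(x, y, 0)] else pts)) pts) []
      = xs.flatMap (fun x => ys.flatMap (fun y => aBlock hw height x y)) := by
    rw [List.foldl_ext _ (fun pts x => pts ++ ys.flatMap (fun y => aBlock hw height x y)) []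
      (fun pts x _ => by
        rw [List.foldl_ext _ (fun pts y => pts ++ aBlock hw height x y) pts
          (fun acc y _ => by simp only [aBlock]; split_ifs <;> simp),
          PySem.List.foldl_append_eq_flatMap]),
      PySem.List.foldl_append_eq_flatMap, List.nil_append]
  rw [hA]
  -- B is set(flatten of its columns), built by per-column updates
  have hB : xs.foldl (fun pts x =>
      PySem.Set.update pts ((PySem.List.pyRange
        (if |x| = hw then (0:Int) else max 0 (height - bIsqrt (hw*hw - x*x)))
        (height+1) 1).map (fun y => ((x : Int), (y : Int), (0 : Int))))) (PySem.Set.empty)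
      = PySem.Set.ofList (xs.flatMap (fun x => (PySem.List.pyRange
        (if |x| = hw then (0:Int) else max 0 (height - bIsqrt (hw*hw - x*x)))
        (height+1) 1).map (fun y => ((x : Int), (y : Int), (0 : Int))))) := by
    have h := foldl_update_flatMap xs (fun x => (PySem.List.pyRange
        (if |x| = hw then (0:Int) else max 0 (height - bIsqrt (hw*hw - x*x)))
        (height+1) 1).map (fun y => ((x : Int), (y : Int), (0 : Int)))) []
    simpa using h
  rw [hB]
  -- set(A's pts) equals set of B's flatten once A's deduped pts equal B's flatten
  refine Eq.trans (PySem.Set.ofList_ofList _).symm (congrArg PySem.Set.ofList ?_)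
  -- flatten A's cells into pairs
  have hcells : xs.flatMap (fun x => ys.flatMap (fun y => aBlock hw height x y))
      = (xs.flatMap (fun x => ys.map (fun y => (x, y)))).flatMap (fun c => aBlock hw height c.1 c.2) := by
    simp [List.flatMap_assoc, List.flatMap_map]
  rw [hcells]
  set cells := xs.flatMap (fun x => ys.map (fun y => (x, y))) with hcellsdef
  -- dedup collapses each cell's block to one point
  have hnodup : (cells.map (fun c : Int × Int => (c.1, c.2, (0:Int)))).Nodup := by
    apply List.Nodup.map
    · intro a b hab
      simpa [Prod.ext_iff] using hab
    · have := List.Nodup.product (PySem.List.nodup_pyRange_one (a := -hw) (b := hw+1))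
        (PySem.List.nodup_pyRange_one (a := 0) (b := height+1))
      simpa [List.product, SProd.sprod, hcellsdef, hxs, hys] using this
  have hdedup := foldl_add_flatMap cells (fun c => aBlock hw height c.1 c.2)
      (fun c : Int × Int => (c.1, c.2, (0:Int))) (fun c => aBlock_sub hw height c.1 c.2)
      [] hnodup (by simp)
  rw [PySem.Set.ofList_eq_foldl, hdedup, List.nil_append, hcellsdef]
  -- back to nested flatMaps, then per-column
  rw [List.flatMap_assoc]
  simp only [List.flatMap_map]
  apply List.flatMap_congr
  intro x hxmem
  rw [hxs, PySem.List.mem_pyRange_one] at hxmem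
  exact column_eq hw height x hxmem
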